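-- pv_equiv track=rewrite | github.com/jwsu825/TwitterScript | graph.py | edge_list_directed
-- ===== SOURCE A (Python) =====
-- def edge_list_directed(following_info,user_group):
-- 	"""create edge list from following information for a given user group
--
-- 	Parameters
-- 	----------
-- 	user_group : a set/list of user id
-- 	following_info : a dictionary that contain following info of this user group
--
-- 	Returns
-- 	-------
-- 	edge list for user_group:
-- 		create an edge(user1, user2) iff user1 follow user2
-- 	"""
-- 	edge_list = []
--
-- 	for user1 in user_group:
-- 		for user2 in user_group:
-- 			if user1 == user2:
-- 				pass
-- 			else:
-- 				if user2 in following_info[user1]: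
-- 					edge = (user1, user2)
-- 					edge_list.append(edge)
--
-- 	return edge_list
-- ===== SOURCE B (Python) =====
-- def edge_list_directed(following_info, user_group):
-- 	"""create edge list from following information for a given user group
--
-- 	Index the group's positions once, then walk each user's (deduplicated)
-- 	followee list and sort the collected positions, instead of scanning the
-- 	whole group and searching the followee list for every ordered pair.
-- 	"""
-- 	pos = {}
-- 	for i, u in enumerate(user_group):
-- 		pos.setdefault(u, []).append(i)
--
-- 	edge_list = []
-- 	for user1 in user_group:
-- 		idxs = []
-- 		for f in dict.fromkeys(following_info[user1]):
-- 			if f != user1 and f in pos: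
-- 				idxs.extend(pos[f])
-- 		idxs.sort()
-- 		for i in idxs:
-- 			edge_list.append((user1, user_group[i]))
-- 	return edge_list
-- ===== Notes on version B (the rewrite author's own statement) =====
-- stated objective: alternative
-- what changed: Instead of a nested scan over all ordered group pairs with a linear 'in followees' search, B indexes the group's positions in a dict once, walks each user's deduplicated followee list collecting group positions, and sorts them to restore group order (O(n + F + E log E) work vs A's O(n^2*L); a timing run could not verify this because its large inputs fall outside Pre_).
-- outside the precondition, e.g. on edge_list_directed({}, [5, 5]): A returns [], B raises KeyError
import Mathlib
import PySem

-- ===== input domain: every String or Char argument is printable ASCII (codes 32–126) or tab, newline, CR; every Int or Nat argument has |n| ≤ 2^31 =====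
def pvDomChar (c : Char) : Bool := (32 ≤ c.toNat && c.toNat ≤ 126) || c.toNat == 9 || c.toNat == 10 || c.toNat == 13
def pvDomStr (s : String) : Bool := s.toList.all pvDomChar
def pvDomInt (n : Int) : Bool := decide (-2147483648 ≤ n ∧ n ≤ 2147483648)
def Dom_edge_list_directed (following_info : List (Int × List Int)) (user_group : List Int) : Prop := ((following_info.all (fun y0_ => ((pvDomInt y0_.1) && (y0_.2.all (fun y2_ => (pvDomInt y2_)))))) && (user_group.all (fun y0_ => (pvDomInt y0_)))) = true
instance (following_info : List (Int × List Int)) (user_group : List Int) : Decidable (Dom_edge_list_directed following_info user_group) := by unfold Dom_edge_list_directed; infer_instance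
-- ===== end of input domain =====

-- B replaces A's nested all-pairs scan by a positions index over the group plus a walk of each
-- user's deduplicated followee list, sorting the collected positions (a different algorithm
-- doing less work per pair; equality proved on Pre_, speed not measured).

-- ===== PORT A =====
-- literal port of A's nested loops; `following_info[user1]` is the dict lookup (none = KeyError,
-- excluded by Pre_; the `none` branch just keeps the accumulator)
def edge_list_directed (following_info : List (Int × List Int)) (user_group : List Int) : List (Int × Int) :=
  user_group.foldl (fun edge_list user1 =>
    user_group.foldl (fun acc user2 =>
      if user1 = user2 then acc
      else
        match PySem.Dict.get? (⟨following_info⟩ : PySem.Dict Int (List Int)) user1 with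
        | some fl => if fl.contains user2 then acc ++ [(user1, user2)] else acc
        | none => acc) edge_list) []

-- ===== PORT B =====
-- literal port of Source B: build pos (group positions per id), then per user1 walk the deduplicated
-- followee list, collect positions of group members ≠ user1, sort, and emit edges
-- pos = {id: [positions in user_group]} (the first loop of Source B)
def pvBuildPos (user_group : List Int) : PySem.Dict Int (List Int) :=
  (PySem.List.enumerate user_group 0).foldl
    (fun d p => d.insert p.2 (d.getD p.2 [] ++ [p.1])) ⟨[]⟩

def edge_list_directed_alt (following_info : List (Int × List Int)) (user_group : List Int) : List (Int × Int) :=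
  let pos := pvBuildPos user_group
  user_group.foldl (fun edge_list user1 =>
    match PySem.Dict.get? (⟨following_info⟩ : PySem.Dict Int (List Int)) user1 with
    | none => edge_list   -- KeyError in Python; excluded by Pre_
    | some fl =>
      let idxs := (PySem.List.dedup fl).foldl (fun a f =>
        if f ≠ user1 then
          match PySem.Dict.get? pos f with
          | some lst => a ++ lst
          | none => a
        else a) []
      let sidxs := PySem.List.sorted idxs (fun i => i) false
      sidxs.foldl (fun es i => es ++ [(user1, PySem.List.pyGetD user_group i 0)]) edge_list) []

-- ===== PRECONDITION & SPEC =====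
-- Pre_ requires every group member to be a key of following_info: on a missing key Python's
-- `following_info[user1]` raises KeyError in both programs — except that A skips the lookup
-- entirely when every group pair is equal (a group of one repeated id) and returns [], while B
-- still looks the id up and raises; Pre_ excludes those inputs.
def Pre_edge_list_directed (following_info : List (Int × List Int)) (user_group : List Int) : Prop :=
  ∀ u ∈ user_group, (PySem.Dict.get? (⟨following_info⟩ : PySem.Dict Int (List Int)) u).isSome = true
instance (following_info : List (Int × List Int)) (user_group : List Int) : Decidable (Pre_edge_list_directed following_info user_group) := by unfold Pre_edge_list_directed; infer_instance

def pvWitness_edge_list_directed : (List (Int × List Int)) × List Int := ([(1, [2, 3]), (2, [1])], [1, 2])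

def Spec_edge_list_directed (following_info : List (Int × List Int)) (user_group : List Int) (out : List (Int × Int)) : Prop := out = edge_list_directed_alt following_info user_group
instance (following_info : List (Int × List Int)) (user_group : List Int) (out : List (Int × Int)) : Decidable (Spec_edge_list_directed following_info user_group out) := by unfold Spec_edge_list_directed; infer_instance

-- ===== CLAIM (what is proved, stated in full; the proofs are below) =====
def Claim_equal_edge_list_directed : Prop := ∀ (following_info : List (Int × List Int)) (user_group : List Int), Dom_edge_list_directed following_info user_group → Pre_edge_list_directed following_info user_group → Spec_edge_list_directed following_info user_group (edge_list_directed following_info user_group)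

-- ===== LEMMAS AND PROOFS =====

-- `occ ug f`: the positions at which `f` occurs in `ug` (what pos[f] holds)
def pvOcc (ug : List Int) (f : Int) : List Int :=
  (PySem.List.enumerate ug 0).filterMap (fun p => if p.2 = f then some p.1 else none)

-- generic facts about PySem.List.enumerate
theorem pv_enum_snd (ug : List Int) (s : Int) :
    (PySem.List.enumerate ug s).map Prod.snd = ug := by
  induction ug generalizing s with
  | nil => rfl
  | cons x t ih => simp [PySem.List.enumerate, ih]

theorem pv_enum_mem (ug : List Int) (s : Int) :
    ∀ p ∈ PySem.List.enumerate ug s, s ≤ p.1 ∧ PySem.List.pyGetD ug (p.1 - s) 0 = p.2 := by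
  induction ug generalizing s with
  | nil => intro p hp; simp [PySem.List.enumerate] at hp
  | cons x t ih =>
    intro p hp
    have hp' : p = (s, x) ∨ p ∈ PySem.List.enumerate t (s+1) := by
      simpa [PySem.List.enumerate] using hp
    rcases hp' with h | h
    · subst h
      refine ⟨le_refl _, ?_⟩
      rw [PySem.List.pyGetD_of_nonneg _ _ (by omega : (0:Int) ≤ s - s)]
      simp

    · obtain ⟨h1, h2⟩ := ih (s+1) p h
      refine ⟨by omega, ?_⟩
      rw [PySem.List.pyGetD_of_nonneg _ _ (by omega : (0:Int) ≤ p.1 - s)]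
      rw [PySem.List.pyGetD_of_nonneg _ _ (by omega : (0:Int) ≤ p.1 - (s+1))] at h2
      have : (p.1 - s).toNat = (p.1 - (s+1)).toNat + 1 := by omega
      simpa [this] using h2

theorem pv_enum_pairwise (ug : List Int) (s : Int) :
    (PySem.List.enumerate ug s).Pairwise (fun a b => a.1 < b.1) := by
  induction ug generalizing s with
  | nil => simp [PySem.List.enumerate]
  | cons x t ih =>
    simp only [PySem.List.enumerate]
    refine List.Pairwise.cons ?_ (ih (s+1))
    intro q hq
    have := (pv_enum_mem t (s+1) q hq).1
    simpa using by omega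

-- the pos dict built by B: get? = some (occurrence list) iff the key occurs
theorem pv_pos_get (l : List (Int × Int)) (d : PySem.Dict Int (List Int)) (f : Int) :
    (l.foldl (fun d p => d.insert p.2 (d.getD p.2 [] ++ [p.1])) d).get? f =
      if (d.get? f).isSome ∨ f ∈ l.map Prod.snd then
        some (d.getD f [] ++ l.filterMap (fun p => if p.2 = f then some p.1 else none))
      else none := by
  induction l generalizing d with
  | nil =>
    simp only [List.foldl_nil, List.map_nil, List.filterMap_nil, List.append_nil,
      List.not_mem_nil, or_false, PySem.Dict.getD]
    split
    · rename_i h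
      obtain ⟨v, hv⟩ := Option.isSome_iff_exists.mp h
      simp [hv]
    · rename_i h
      simp [Option.not_isSome_iff_eq_none.mp h]
  | cons p t ih =>
    simp only [List.foldl_cons, ih, PySem.Dict.get?_insert, PySem.Dict.getD_insert,
      List.map_cons, List.filterMap_cons]
    by_cases hf : f = p.2
    · simp [hf]
    · have hf' : ¬ p.2 = f := fun h => hf h.symm
      rw [if_neg hf, if_neg hf, if_neg hf']
      exact if_congr (by simp [List.mem_cons, hf]) (by rfl) rfl

-- map over filter as filterMap (specific shape used below)
theorem pv_map_filter (p : Int → Bool) (g : Int → Int × Int) (l : List Int) :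
    (l.filter p).map g = l.filterMap (fun u => if p u then some (g u) else none) := by
  induction l with
  | nil => rfl
  | cons x t ih => by_cases h : p x <;> simp [h, ih]

-- snd-projection of an enumerate filterMap (specific shape used below)
theorem pv_enum_filterMap_snd (ug : List Int) (s : Int) (F : Int → Option (Int × Int)) :
    (PySem.List.enumerate ug s).filterMap (fun p => F p.2) = ug.filterMap F := by
  induction ug generalizing s with
  | nil => rfl
  | cons x t ih => simp only [PySem.List.enumerate, List.filterMap_cons, ih]

-- occurrence lists: membership and strict ordering
theorem pv_mem_occ (ug : List Int) (f i : Int) :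
    i ∈ pvOcc ug f ↔ (i, f) ∈ PySem.List.enumerate ug 0 := by
  unfold pvOcc
  rw [List.mem_filterMap]
  constructor
  · rintro ⟨⟨j, u⟩, hp, hs⟩
    by_cases h : u = f
    · subst h
      have : j = i := by simpa using hs
      subst this
      exact hp
    · simp [h] at hs
  · intro h; exact ⟨(i, f), h, by simp⟩

theorem pv_occ_pairwise (ug : List Int) (f : Int) :
    (pvOcc ug f).Pairwise (fun a b => a < b) := by
  unfold pvOcc
  rw [List.pairwise_filterMap]
  refine (pv_enum_pairwise ug 0).imp ?_
  intro a a' h b hb b' hb'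
  split at hb
  · cases hb
    split at hb'
    · cases hb'; exact h
    · cases hb'
  · cases hb

theorem pv_enum_functional (ug : List Int) {i u v : Int}
    (h1 : (i, u) ∈ PySem.List.enumerate ug 0) (h2 : (i, v) ∈ PySem.List.enumerate ug 0) : u = v := by
  have e1 := (pv_enum_mem ug 0 _ h1).2
  have e2 := (pv_enum_mem ug 0 _ h2).2
  simp only at e1 e2
  rw [← e1, ← e2]

theorem pv_mem_of_enum (ug : List Int) {i u : Int}
    (h : (i, u) ∈ PySem.List.enumerate ug 0) : u ∈ ug := by
  have := List.mem_map_of_mem (f := Prod.snd) h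
  rwa [pv_enum_snd] at this

-- the crux: per user1 with followee list fl, B's sorted index block is A's index filter
theorem pv_block (ug : List Int) (user1 : Int) (fl : List Int) :
    (PySem.List.sorted
        ((PySem.List.dedup fl).foldl (fun a f =>
          if f ≠ user1 then
            match (if (f ∈ ug) then some (pvOcc ug f) else none) with
            | some lst => a ++ lst
            | none => a
          else a) []) (fun i => i) false) =
      (PySem.List.enumerate ug 0).filterMap
        (fun p => if (decide (user1 ≠ p.2) && fl.contains p.2) then some p.1 else none) := by
  set G : Int → List Int := fun f => if f = user1 then [] else (if f ∈ ug then pvOcc ug f else []) with hG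
  have hstep : (fun (a : List Int) f =>
      if f ≠ user1 then
        match (if (f ∈ ug) then some (pvOcc ug f) else none) with
        | some lst => a ++ lst
        | none => a
      else a) = fun a f => a ++ G f := by
    funext a f
    by_cases h1 : f = user1
    · simp [hG, h1]
    · by_cases h2 : f ∈ ug <;> simp [hG, h1, h2]
  rw [hstep, PySem.List.foldl_append_eq_flatMap, List.nil_append]
  set L := (PySem.List.dedup fl).flatMap G with hL
  set T := (PySem.List.enumerate ug 0).filterMap
      (fun p => if (decide (user1 ≠ p.2) && fl.contains p.2) then some p.1 else none) with hT
  have hTpw : T.Pairwise (fun a b => a < b) := by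
    rw [hT, List.pairwise_filterMap]
    refine (pv_enum_pairwise ug 0).imp ?_
    intro a a' h b hb b' hb'
    split at hb
    · cases hb
      split at hb'
      · cases hb'; exact h
      · cases hb'
    · cases hb
  have hmemG : ∀ f i, i ∈ G f ↔ f ≠ user1 ∧ f ∈ ug ∧ (i, f) ∈ PySem.List.enumerate ug 0 := by
    intro f i
    by_cases h1 : f = user1
    · simp [hG, h1]
    · by_cases h2 : f ∈ ug
      · simp [hG, h1, h2, pv_mem_occ]
      · simp only [hG, if_neg h1, if_neg h2]
        simp only [List.not_mem_nil, false_iff]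
        rintro ⟨-, h, -⟩
        exact h2 h
  have hTnd : T.Nodup := hTpw.imp (fun h => ne_of_lt h)
  have hLnd : L.Nodup := by
    rw [hL, List.nodup_flatMap]
    constructor
    · intro f _
      by_cases h1 : f = user1
      · simp [hG, h1]
      · by_cases h2 : f ∈ ug
        · simpa [hG, h1, h2] using (pv_occ_pairwise ug f).imp (fun h => ne_of_lt h)
        · simp [hG, h1, h2]
    · have hnd : (PySem.List.dedup fl).Nodup := by
        unfold PySem.List.dedup; exact PySem.Set.nodup_ofList fl
      refine hnd.imp ?_
      intro f f' hne
      intro i hi hi'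
      obtain ⟨-, -, h1c⟩ := (hmemG f i).mp hi
      obtain ⟨-, -, h2c⟩ := (hmemG f' i).mp hi'
      exact hne (pv_enum_functional ug h1c h2c)
  have hmemT : ∀ i, i ∈ T ↔ ∃ u, (i, u) ∈ PySem.List.enumerate ug 0 ∧ u ≠ user1 ∧ u ∈ fl := by
    intro i
    rw [hT, List.mem_filterMap]
    constructor
    · rintro ⟨p, hp, hs⟩
      split at hs
      · rename_i hcond
        cases hs
        simp only [Bool.and_eq_true, decide_eq_true_eq, List.contains_iff_mem] at hcond
        exact ⟨p.2, by simpa using hp, fun h => hcond.1 h.symm, hcond.2⟩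
      · cases hs
    · rintro ⟨u, hu, hne, hmem⟩
      refine ⟨(i, u), hu, ?_⟩
      simp [hne.symm, hmem]
  have hmemL : ∀ i, i ∈ L ↔ ∃ u, (i, u) ∈ PySem.List.enumerate ug 0 ∧ u ≠ user1 ∧ u ∈ fl := by
    intro i
    rw [hL, List.mem_flatMap]
    constructor
    · rintro ⟨f, hf, hi⟩
      obtain ⟨h1, _, h3⟩ := (hmemG f i).mp hi
      have : f ∈ fl := by
        have := hf; unfold PySem.List.dedup at this
        exact (PySem.Set.mem_ofList fl f).mp this
      exact ⟨f, h3, h1, this⟩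
    · rintro ⟨u, hu, hne, hmem⟩
      refine ⟨u, ?_, (hmemG u i).mpr ⟨hne, pv_mem_of_enum ug hu, hu⟩⟩
      unfold PySem.List.dedup
      exact (PySem.Set.mem_ofList fl u).mpr hmem
  have hperm : T.Perm L := by
    refine List.perm_of_nodup_nodup_toFinset_eq hTnd hLnd ?_
    ext i
    simp only [List.mem_toFinset, hmemT, hmemL]
  exact PySem.List.sorted_eq_of_perm_of_pairwise_lt L T (fun i => i) hperm hTpw

-- T mapped through user_group[i] is A's filtered block
theorem pv_T_map (ug : List Int) (user1 : Int) (fl : List Int) :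
    ((PySem.List.enumerate ug 0).filterMap
        (fun p => if (decide (user1 ≠ p.2) && fl.contains p.2) then some p.1 else none)).map
      (fun i => (user1, PySem.List.pyGetD ug i 0)) =
    (ug.filter (fun u2 => decide (user1 ≠ u2) && fl.contains u2)).map (fun u2 => (user1, u2)) := by
  rw [List.map_filterMap]
  rw [List.filterMap_congr (g := fun p =>
      if (decide (user1 ≠ p.2) && fl.contains p.2) then some ((user1, p.2)) else none) ?_]
  · rw [pv_enum_filterMap_snd ug 0 (fun u => if (decide (user1 ≠ u) && fl.contains u) then some ((user1, u)) else none)]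
    rw [pv_map_filter]
  · intro p hp
    have h2 := (pv_enum_mem ug 0 p hp).2
    simp only [Int.sub_zero] at h2
    simp [h2]

theorem pv_pos_spec (ug : List Int) (f : Int) :
    PySem.Dict.get? (pvBuildPos ug) f = if f ∈ ug then some (pvOcc ug f) else none := by
  unfold pvBuildPos
  rw [pv_pos_get]
  have hm : (PySem.List.enumerate ug 0).map Prod.snd = ug := pv_enum_snd ug 0
  have h0 : (PySem.Dict.get? (⟨[]⟩ : PySem.Dict Int (List Int)) f) = none := rfl
  simp only [h0, Option.isSome_none, Bool.false_eq_true, false_or, hm]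
  by_cases h : f ∈ ug
  · simp [h, pvOcc, PySem.Dict.getD, h0]
  · simp [h]

theorem edge_list_directed_spec_aux (fi : List (Int × List Int)) (ug : List Int)
    (hpre : Pre_edge_list_directed fi ug) :
    edge_list_directed fi ug = edge_list_directed_alt fi ug := by
  unfold edge_list_directed edge_list_directed_alt
  set FL : Int → List Int := fun u => (PySem.Dict.get? (⟨fi⟩ : PySem.Dict Int (List Int)) u).getD [] with hFL
  set blockA : Int → List (Int × Int) := fun u1 =>
    (ug.filter (fun u2 => decide (u1 ≠ u2) && (FL u1).contains u2)).map (fun u2 => (u1, u2)) with hblock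
  refine Eq.trans (PySem.List.foldl_congr_mem ug _ (fun el u1 => el ++ blockA u1) [] ?_)
    (Eq.symm (PySem.List.foldl_congr_mem ug _ (fun el u1 => el ++ blockA u1) [] ?_))
  · -- A's inner loop appends blockA u1
    intro acc u1 hu1
    obtain ⟨fl, hfl⟩ := Option.isSome_iff_exists.mp (hpre u1 hu1)
    have hfn : (fun (acc2 : List (Int × Int)) user2 =>
        if u1 = user2 then acc2
        else
          match PySem.Dict.get? (⟨fi⟩ : PySem.Dict Int (List Int)) u1 with
          | some fl => if fl.contains user2 then acc2 ++ [(u1, user2)] else acc2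
          | none => acc2) =
        fun acc2 u2 => if (decide (u1 ≠ u2) && fl.contains u2) then acc2 ++ [(u1, u2)] else acc2 := by
      funext a u2
      by_cases h : u1 = u2
      · simp [h]
      · simp [hfl, h]
    rw [hfn, PySem.List.foldl_append_if]
    rw [hblock, hFL]
    simp [hfl]
  · -- B's per-user block is blockA u1
    intro acc u1 hu1
    obtain ⟨fl, hfl⟩ := Option.isSome_iff_exists.mp (hpre u1 hu1)
    simp only [hfl, pv_pos_spec]
    rw [pv_block ug u1 fl, PySem.List.foldl_append_singleton_eq_map, pv_T_map]
    rw [hblock, hFL]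
    simp [hfl]

-- ===== VERDICT (by name: the statement is the Claim_ definition above) =====
theorem edge_list_directed_spec : Claim_equal_edge_list_directed := by
  intro fi ug _ hpre
  unfold Spec_edge_list_directed
  exact edge_list_directed_spec_aux fi ug hpre
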